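-- pv_equiv track=rewrite | github.com/jzhao62/lintcode_manuscript | lintcode/224/draft1.py | delete_char
-- ===== SOURCE A (Python) =====
-- def delete_char(str, k):
--     mono_stack = []
--     # 计算允许删除的quota
--     allow_to_delete = len(str) - k
--     for c in str:
--         # 如果quota有存量，当前字符串比stack top小
--         while mono_stack and allow_to_delete > 0 and c < mono_stack[-1]:
--             # 踢掉，更新quota
--             mono_stack.pop()
--             allow_to_delete -= 1
--         # 保证mono increasing
--         mono_stack.append(c)
--
--
--     # 把quota用完
--     while allow_to_delete > 0 and mono_stack:
--         mono_stack.pop()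
--         allow_to_delete -= 1
--     return "".join(mono_stack)
-- ===== SOURCE B (Python) =====
-- def delete_char(str, k):
--     n = len(str)
--     keep = max(0, min(k, n))
--     rest = str
--     out = []
--     for r in range(keep, 0, -1):
--         window = rest[:len(rest) - r + 1]
--         m = min(window)
--         best = window.index(m)
--         out.append(m)
--         rest = rest[best + 1:]
--     return "".join(out)
-- ===== Notes on version B (the rewrite author's own statement) =====
-- stated objective: alternative
-- what changed: Replaces A's single-pass quota-limited monotonic stack (pop while the incoming char is smaller, then drain leftover quota) by direct greedy selection: compute keep = max(0, min(k, len)) and pick each of the keep output characters as the leftmost minimum of its feasible window, restarting the scan after the chosen position.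
import Mathlib
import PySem

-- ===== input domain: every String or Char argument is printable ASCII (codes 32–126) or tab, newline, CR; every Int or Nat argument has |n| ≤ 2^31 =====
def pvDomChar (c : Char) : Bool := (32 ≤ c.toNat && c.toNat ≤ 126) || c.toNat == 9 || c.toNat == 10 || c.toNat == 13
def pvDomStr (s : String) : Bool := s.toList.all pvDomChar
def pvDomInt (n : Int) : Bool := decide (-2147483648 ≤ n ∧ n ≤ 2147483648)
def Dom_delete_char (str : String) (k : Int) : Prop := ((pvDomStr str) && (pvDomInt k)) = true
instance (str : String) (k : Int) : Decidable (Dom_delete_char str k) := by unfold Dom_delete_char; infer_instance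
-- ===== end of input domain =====

-- B replaces A's quota-limited monotonic stack by greedy window-minimum selection of the
-- keep = max(0, min(k, len)) retained characters (objective: alternative algorithm, same result).

-- ===== PORT A =====
-- the inner `while mono_stack and allow_to_delete > 0 and c < mono_stack[-1]` loop
-- (stack kept reversed: head = Python's stack top)
def popWhileA (c : Char) : List Char → Int → List Char × Int
  | [], a => ([], a)
  | t :: ts, a => if a > 0 ∧ c < t then popWhileA c ts (a - 1) else (t :: ts, a)

-- the `for c in str` loop
def runA : List Char → List Char → Int → List Char × Int
  | [], st, a => (st, a)
  | c :: cs, st, a =>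
      let p := popWhileA c st a
      runA cs (c :: p.1) p.2

-- the final `while allow_to_delete > 0 and mono_stack` loop
def drainA : List Char → Int → List Char
  | [], _ => []
  | t :: ts, a => if a > 0 then drainA ts (a - 1) else t :: ts

def delete_char (str : String) (k : Int) : String :=
  let s := str.toList
  let r := runA s [] ((s.length : Int) - k)
  String.mk (drainA r.1 r.2).reverse

-- ===== PORT B =====
-- `m = min(window)` (the window is always nonempty, so the [] case is unreachable)
def minCh : List Char → Char
  | [] => ' '
  | x :: xs => xs.foldl min x

-- `best = window.index(m)`; Python's .index never raises here since m occurs in window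
def bestIdx (w : List Char) : Nat := w.idxOf (minCh w)

-- the `for r in range(keep, 0, -1)` loop over the remaining output length
def greedyGo : List Char → Nat → List Char
  | _, 0 => []
  | rest, r + 1 =>
      let w := rest.take (rest.length - r)
      let b := bestIdx w
      minCh w :: greedyGo (rest.drop (b + 1)) r

def delete_char_alt (str : String) (k : Int) : String :=
  let s := str.toList
  let keep := (max 0 (min k (s.length : Int))).toNat
  String.mk (greedyGo s keep)

-- ===== PRECONDITION & SPEC =====
def Spec_delete_char (str : String) (k : Int) (out : String) : Prop := out = delete_char_alt str k
instance (str : String) (k : Int) (out : String) : Decidable (Spec_delete_char str k out) := by unfold Spec_delete_char; infer_instance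

-- ===== CLAIM (what is proved, stated in full; the proofs are below) =====
def Claim_equal_delete_char : Prop := ∀ (str : String) (k : Int), Dom_delete_char str k → Spec_delete_char str k (delete_char str k)

-- ===== LEMMAS AND PROOFS =====

-- popWhileA preserves allow - stack length
theorem popWhileA_delta (c : Char) (st : List Char) (a : Int) :
    (popWhileA c st a).2 - ((popWhileA c st a).1.length : Int) = a - st.length := by
  induction st generalizing a with
  | nil => simp [popWhileA]
  | cons t ts ih =>
    simp only [popWhileA]
    split_ifs with h
    · have := ih (a - 1)
      simp only [List.length_cons]
      push_cast at this ⊢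
      omega
    · simp

theorem popWhileA_nonneg (c : Char) (st : List Char) (a : Int) (h : 0 ≤ a) :
    0 ≤ (popWhileA c st a).2 := by induction st generalizing a with
  | nil => simpa [popWhileA] using h
  | cons t ts ih =>
    simp only [popWhileA]
    split_ifs with hc
    · exact ih (a - 1) (by omega)
    · exact h

theorem popWhileA_mem (c : Char) (st : List Char) (a : Int) :
    ∀ x ∈ (popWhileA c st a).1, x ∈ st := by induction st generalizing a with
  | nil => simp [popWhileA]
  | cons t ts ih =>
    simp only [popWhileA]
    split_ifs with hc
    · intro x hx; exact List.mem_cons_of_mem _ (ih (a - 1) x hx)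
    · intro x hx; simpa using hx

theorem popWhileA_id (c : Char) (st : List Char) (a : Int) (h : a ≤ 0) :
    popWhileA c st a = (st, a) := by cases st with
  | nil => rfl
  | cons t ts => simp only [popWhileA]; split_ifs with hc
                 · omega
                 · rfl

theorem popWhileA_all (c : Char) (st : List Char) (a : Int)
    (h1 : ∀ x ∈ st, c < x) (h2 : (st.length : Int) ≤ a) :
    popWhileA c st a = ([], a - st.length) := by induction st generalizing a with
  | nil => simp [popWhileA]
  | cons t ts ih =>
    simp only [popWhileA]
    have hct : c < t := h1 t (List.mem_cons_self ..)
    have hlen : ((t :: ts).length : Int) = ts.length + 1 := by push_cast [List.length_cons]; ring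
    rw [if_pos ⟨by omega, hct⟩]
    rw [ih (a - 1) (fun x hx => h1 x (List.mem_cons_of_mem _ hx)) (by omega)]
    refine Prod.ext rfl ?_
    simp only [List.length_cons]
    push_cast
    ring

theorem popWhileA_append (c x0 : Char) (st : List Char) (a : Int)
    (h : (st.length : Int) < a → ¬ c < x0) :
    popWhileA c (st ++ [x0]) a = ((popWhileA c st a).1 ++ [x0], (popWhileA c st a).2) := by
  induction st generalizing a with
  | nil =>
    simp only [List.nil_append, popWhileA]
    split_ifs with hc
    · exact absurd hc.2 (h (by simpa using hc.1))
    · rfl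
  | cons t ts ih =>
    simp only [List.cons_append, popWhileA]
    split_ifs with hc
    · exact ih (a - 1) (fun hl => h (by simp only [List.length_cons]; push_cast at hl ⊢; omega))
    · rfl

theorem runA_delta (cs st : List Char) (a : Int) :
    (runA cs st a).2 - ((runA cs st a).1.length : Int) = a - st.length - cs.length := by
  induction cs generalizing st a with
  | nil => simp [runA]
  | cons c cs ih =>
    simp only [runA]
    have h1 := popWhileA_delta c st a
    have h2 := ih (c :: (popWhileA c st a).1) (popWhileA c st a).2
    simp only [List.length_cons] at h2 ⊢
    push_cast at h1 h2 ⊢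
    omega

theorem runA_mem (cs st : List Char) (a : Int) :
    ∀ x ∈ (runA cs st a).1, x ∈ cs ∨ x ∈ st := by induction cs generalizing st a with
  | nil => intro x hx; right; simpa [runA] using hx
  | cons c cs ih =>
    intro x hx
    simp only [runA] at hx
    rcases ih _ _ x hx with h1 | h1
    · exact Or.inl (List.mem_cons_of_mem _ h1)
    · rcases List.mem_cons.mp h1 with h2 | h2
      · exact Or.inl (h2 ▸ List.mem_cons_self ..)
      · exact Or.inr (popWhileA_mem c st a x h2)

theorem runA_append (p q st : List Char) (a : Int) :
    runA (p ++ q) st a = runA q (runA p st a).1 (runA p st a).2 := by induction p generalizing st a with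
  | nil => simp [runA]
  | cons c cs ih => simp only [List.cons_append, runA]; exact ih _ _

theorem runA_nopop (cs st : List Char) (a : Int) (h : a ≤ 0) :
    runA cs st a = (cs.reverse ++ st, a) := by induction cs generalizing st a with
  | nil => simp [runA]
  | cons c cs ih =>
    simp only [runA, popWhileA_id c st a h]
    rw [ih (c :: st) a h]
    simp

-- the bottom character c is never popped when the first (a - |st|) coming chars are all ≥ c
theorem runA_protect (c : Char) (cs st : List Char) (a : Int) (ha : 0 ≤ a)
    (h : ∀ j : Nat, (j : Int) < a - st.length → ∀ hj : j < cs.length, ¬ cs[j] < c) :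
    runA cs (st ++ [c]) a = ((runA cs st a).1 ++ [c], (runA cs st a).2) := by
  induction cs generalizing st a with
  | nil => simp [runA]
  | cons r rs ih =>
    simp only [runA]
    have hpw : popWhileA r (st ++ [c]) a
        = ((popWhileA r st a).1 ++ [c], (popWhileA r st a).2) := by
      refine popWhileA_append r c st a (fun hl => ?_)
      have := h 0 (by push_cast; omega) (by simp)
      simpa using this
    rw [hpw]
    have hd := popWhileA_delta r st a
    have := ih (r :: (popWhileA r st a).1) (popWhileA r st a).2
      (popWhileA_nonneg r st a ha)
      (fun j hj hj2 => by
        have hh := h (j + 1) (by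
          simp only [List.length_cons] at hj
          push_cast at hj hd ⊢
          omega) (by simpa using Nat.succ_lt_succ hj2)
        simpa using hh)
    simpa using this

theorem drainA_drop (st : List Char) (a : Int) (h : a ≤ st.length) :
    drainA st a = st.drop a.toNat := by induction st generalizing a with
  | nil => simp [drainA]
  | cons t ts ih =>
    simp only [drainA]
    split_ifs with hc
    · rw [ih (a - 1) (by simp only [List.length_cons] at h; push_cast at h ⊢; omega)]
      have : a.toNat = (a - 1).toNat + 1 := by omega
      rw [this, List.drop_succ_cons]
    · have : a.toNat = 0 := by omega
      rw [this, List.drop_zero]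

theorem drainA_nil (st : List Char) (a : Int) (h : (st.length : Int) ≤ a) :
    drainA st a = [] := by induction st generalizing a with
  | nil => rfl
  | cons t ts ih =>
    simp only [drainA]
    simp only [List.length_cons] at h
    rw [if_pos (by push_cast at h; omega)]
    exact ih (a - 1) (by push_cast at h ⊢; omega)

theorem drainA_nonpos (st : List Char) (a : Int) (h : a ≤ 0) :
    drainA st a = st := by cases st with
  | nil => rfl
  | cons t ts => simp only [drainA]; rw [if_neg (by omega)]

-- bestIdx is the leftmost minimum
def LMin (w : List Char) (b m : Nat) : Prop :=
  b < m ∧ (∀ j < m, ¬ w.getD j ' ' < w.getD b ' ') ∧ (∀ j < b, w.getD b ' ' < w.getD j ' ')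

theorem drainA_append (st : List Char) (c : Char) (a : Int) (h : a ≤ st.length) :
    drainA (st ++ [c]) a = drainA st a ++ [c] := by
  rw [drainA_drop st a h, drainA_drop (st ++ [c]) a (by simp; omega)]
  exact List.drop_append_of_le_length (by omega)

theorem foldl_min_le (xs : List Char) (a : Char) :
    xs.foldl min a ≤ a ∧ ∀ x ∈ xs, xs.foldl min a ≤ x := by
  induction xs generalizing a with
  | nil => simp
  | cons y ys ih =>
    obtain ⟨h1, h2⟩ := ih (min a y)
    refine ⟨le_trans h1 (min_le_left a y), ?_⟩
    intro x hx
    rcases List.mem_cons.mp hx with hx | hx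
    · rw [hx]; exact le_trans h1 (min_le_right a y)
    · exact h2 x hx

theorem foldl_min_mem (xs : List Char) (a : Char) :
    xs.foldl min a = a ∨ xs.foldl min a ∈ xs := by
  induction xs generalizing a with
  | nil => simp
  | cons y ys ih =>
    rcases ih (min a y) with h | h
    · rcases min_cases a y with ⟨he, _⟩ | ⟨he, _⟩
      · exact Or.inl (by rw [List.foldl_cons, h, he])
      · exact Or.inr (by rw [List.foldl_cons, h, he]; exact List.mem_cons_self ..)
    · exact Or.inr (List.mem_cons_of_mem _ h)

theorem minCh_le (w : List Char) : ∀ x ∈ w, minCh w ≤ x := by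
  cases w with
  | nil => simp
  | cons y ys =>
    intro x hx
    rcases List.mem_cons.mp hx with hx | hx
    · exact hx ▸ (foldl_min_le ys y).1
    · exact (foldl_min_le ys y).2 x hx

theorem minCh_mem (w : List Char) (hw : w ≠ []) : minCh w ∈ w := by
  cases w with
  | nil => exact absurd rfl hw
  | cons y ys =>
    rcases foldl_min_mem ys y with h | h
    · have h2 : minCh (y :: ys) = y := h
      rw [h2]; exact List.mem_cons_self ..
    · exact List.mem_cons_of_mem _ h

theorem bestIdx_lmin (w : List Char) (hw : w ≠ []) : LMin w (bestIdx w) w.length := by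
  have hm : minCh w ∈ w := minCh_mem w hw
  have hb : bestIdx w < w.length := List.idxOf_lt_length_of_mem hm
  have hbv : w.getD (bestIdx w) ' ' = minCh w := by
    rw [List.getD_eq_getElem _ ' ' hb]
    exact List.getElem_idxOf hb
  refine ⟨hb, ?_, ?_⟩
  · intro j hj
    rw [hbv, List.getD_eq_getElem _ ' ' hj]
    exact not_lt_of_ge (minCh_le w _ (List.getElem_mem hj))
  · intro j hj
    have hjl : j < w.length := lt_trans hj hb
    rw [hbv, List.getD_eq_getElem _ ' ' hjl]
    refine lt_of_le_of_ne (minCh_le w _ (List.getElem_mem hjl)) ?_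
    intro he
    have hmem : minCh w ∈ w.take (bestIdx w) := by
      rw [List.mem_take_iff_getElem]
      exact ⟨j, by simp; omega, by simpa using he.symm⟩
    have := (List.mem_take_iff_idxOf_lt hm).mp hmem
    exact absurd this (lt_irrefl _)

theorem greedyGo_full (s : List Char) : greedyGo s s.length = s := by induction s with
  | nil => rfl
  | cons x xs ih =>
    have h1 : (x :: xs).length - xs.length = 1 := by simp
    have h2 : bestIdx [x] = 0 := by simp [bestIdx, minCh]
    have h3 : minCh [x] = x := rfl
    simp [greedyGo, h2, h3, ih]

-- main equivalence for 0 ≤ keep ≤ |s|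
theorem mainA (keep : Nat) (s : List Char) (hk : keep ≤ s.length) :
    (drainA (runA s [] ((s.length : Int) - keep)).1
            (runA s [] ((s.length : Int) - keep)).2).reverse = greedyGo s keep := by
  induction keep generalizing s with
  | zero =>
    have hd := runA_delta s [] ((s.length : Int) - ((0 : Nat) : Int))
    have hl : ((([] : List Char).length : Nat) : Int) = 0 := rfl
    rw [drainA_nil _ _ (by omega)]
    rfl
  | succ r ih =>
    have hr1 : r + 1 ≤ s.length := hk
    set n := s.length with hn
    set a : Int := (n : Int) - (((r + 1 : Nat) : Int)) with ha
    have ha0 : 0 ≤ a := by rw [ha]; omega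
    set dN : Nat := n - (r + 1) with hdN
    have hadN : a = (dN : Int) := by rw [ha, hdN]; push_cast; omega
    set w : List Char := s.take (dN + 1) with hw
    have hwlen : w.length = dN + 1 := by rw [hw, List.length_take]; omega
    have hwne : w ≠ [] := by intro h; rw [h] at hwlen; simp at hwlen
    set b := bestIdx w with hbdef
    obtain ⟨hbm, hmin, hstrict⟩ := bestIdx_lmin w hwne
    rw [← hbdef] at hbm hmin hstrict
    rw [hwlen] at hbm hmin
    have hbn : b < n := by omega
    set c : Char := w.getD b ' ' with hc
    have hcw : ∀ j, j < dN + 1 → w.getD j ' ' = s.getD j ' ' := by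
      intro j hj
      rw [hw, List.getD_eq_getElem _ ' ' (by rw [List.length_take]; omega),
          List.getD_eq_getElem _ ' ' (by omega)]
      exact List.getElem_take
    set rest : List Char := s.drop (b + 1) with hrest
    have hrlen : rest.length = n - (b + 1) := by rw [hrest, List.length_drop]
    have hsplit : s = s.take b ++ (c :: rest) := by
      rw [hc, hcw b hbm, List.getD_eq_getElem _ ' ' hbn, hrest,
          ← List.drop_eq_getElem_cons hbn, List.take_append_drop]
    have htb : (s.take b).length = b := by rw [List.length_take]; omega
    set P := runA (s.take b) [] a with hP
    have hPd : P.2 - (P.1.length : Int) = a - b := by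
      have := runA_delta (s.take b) [] a
      rw [htb] at this; simpa using this
    have hPlen : (P.1.length : Int) ≤ P.2 := by
      rw [hadN] at hPd; omega
    have hPmem : ∀ x ∈ P.1, c < x := by
      intro x hx
      rcases runA_mem _ _ _ x hx with hx1 | hx1
      · obtain ⟨j, hj, hjx⟩ := List.mem_iff_getElem.mp hx1
        have hjb : j < b := by rw [← htb]; exact hj
        have h1 : w.getD b ' ' < w.getD j ' ' := hstrict j hjb
        rw [hcw j (by omega)] at h1
        have h2 : (s.take b)[j] = s.getD j ' ' := by
          rw [List.getD_eq_getElem _ ' ' (by omega)]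
          exact List.getElem_take
        rw [← hjx, h2]
        exact h1
      · simp at hx1
    have hstep1 : runA s [] a = runA (c :: rest) P.1 P.2 := by
      conv_lhs => rw [hsplit]
      rw [runA_append]
    have hpop : popWhileA c P.1 P.2 = ([], P.2 - P.1.length) :=
      popWhileA_all c P.1 P.2 hPmem hPlen
    have hab : a - b = (rest.length : Int) - r := by
      rw [hrlen, hadN]; omega
    have hstep2 : runA (c :: rest) P.1 P.2 = runA rest [c] (a - b) := by
      simp only [runA, hpop, hPd]
    set S := runA rest [] (a - b) with hS
    have hprot : runA rest [c] (a - b) = (S.1 ++ [c], S.2) := by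
      have hyp : ∀ j : Nat, (j : Int) < (a - b) - ([] : List Char).length →
          ∀ hj : j < rest.length, ¬ rest[j] < c := by
        intro j hj hj2
        simp only [List.length_nil, Int.ofNat_zero, sub_zero] at hj
        have hidx : b + 1 + j < dN + 1 := by
          rw [hadN] at hj; omega
        have h1 : ¬ w.getD (b + 1 + j) ' ' < w.getD b ' ' := hmin (b + 1 + j) hidx
        rw [hcw (b + 1 + j) hidx] at h1
        have h2 : rest.getD j ' ' = s.getD (b + 1 + j) ' ' := by
          rw [hrest, List.getD_eq_getElem _ ' ' (by rw [List.length_drop]; omega),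
              List.getD_eq_getElem _ ' ' (by omega)]
          exact List.getElem_drop ..
        rw [← List.getD_eq_getElem rest ' ' hj2, h2]
        exact h1
      have := runA_protect c rest [] (a - b) (by rw [hadN]; omega) hyp
      simpa using this
    have hSd : S.2 - (S.1.length : Int) = (a - b) - rest.length := by
      have := runA_delta rest [] (a - b); simpa using this
    have hSle : S.2 ≤ (S.1.length : Int) := by
      rw [hrlen] at hSd; rw [hadN] at hSd; omega
    have hnr : n - r = dN + 1 := by omega
    calc (drainA (runA s [] a).1 (runA s [] a).2).reverse
        = (drainA (S.1 ++ [c]) S.2).reverse := by rw [hstep1, hstep2, hprot]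
      _ = (drainA S.1 S.2 ++ [c]).reverse := by rw [drainA_append _ _ _ hSle]
      _ = c :: (drainA S.1 S.2).reverse := by simp
      _ = c :: greedyGo rest r := by
            rw [hab] at hS
            rw [hS, ih rest (by rw [hrlen]; omega)]
      _ = greedyGo s (r + 1) := by
            have hbw : b < w.length := by rw [hwlen]; exact hbm
            have hcm : c = minCh w := by
              have hidx : w.idxOf (minCh w) < w.length :=
                List.idxOf_lt_length_of_mem (minCh_mem w hwne)
              have hgi : w[w.idxOf (minCh w)]'hidx = minCh w := List.getElem_idxOf hidx
              rw [hc, List.getD_eq_getElem _ ' ' hbw]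
              exact hgi
            simp only [greedyGo]
            rw [← hn, hnr, ← hw, ← hbdef, ← hrest, ← hcm]

-- ===== VERDICT (by name: the statement is the Claim_ definition above) =====
theorem delete_char_spec : Claim_equal_delete_char := by
  intro str k _
  show delete_char str k = delete_char_alt str k
  simp only [delete_char, delete_char_alt]
  set s := str.toList with hs
  rcases lt_trichotomy k 0 with hk | hk | hk
  · have h1 : (max 0 (min k ((s.length : Nat) : Int))).toNat = 0 := by omega
    rw [h1]
    have hd := runA_delta s [] ((s.length : Int) - k)
    have hl : ((([] : List Char).length : Nat) : Int) = 0 := rfl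
    rw [drainA_nil _ _ (by omega)]
    rfl
  · subst hk
    have h1 : (max 0 (min (0 : Int) ((s.length : Nat) : Int))).toNat = 0 := by omega
    rw [h1]
    have := mainA 0 s (by omega)
    simp only [Nat.cast_zero] at this
    rw [this]
  · rcases le_or_gt k (s.length : Int) with hk2 | hk2
    · have h1 : (max 0 (min k ((s.length : Nat) : Int))).toNat = k.toNat := by omega
      rw [h1]
      have := mainA k.toNat s (by omega)
      rw [show ((k.toNat : Nat) : Int) = k from Int.toNat_of_nonneg (by omega)] at this
      rw [this]
    · have h1 : (max 0 (min k ((s.length : Nat) : Int))).toNat = s.length := by omega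
      rw [h1, greedyGo_full]
      rw [runA_nopop s [] _ (by omega)]
      rw [drainA_nonpos _ _ (by omega)]
      simp
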